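-- pv_equiv track=rewrite | github.com/inaugust/lb | gtklb/completion.py | find_space
-- ===== SOURCE A (Python) =====
-- def find_space(text):
--     balancing = {
--         '"' : '"',
--         "'" : "'",
--         }
--
--     unbalanced=[]
--
--     count = 0
--     prev = ''
--     lastspace=None
--     for l in text:
--         count = count+1
--         if l in balancing.values():
--             if len(unbalanced) != 0:
--                 if balancing[unbalanced[-1]] == l:
--                     unbalanced.pop()
--                 else:
--                     unbalanced.append(l)
--             else:
--                 unbalanced.append(l)
--         elif l in balancing.keys():
--             unbalanced.append(l)
--         if l==' ' and prev!='\\':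
--             if len(unbalanced) == 0:
--                 lastspace = count
--         prev = l
--     return lastspace
-- ===== SOURCE B (Python) =====
-- def find_space(text):
--     # Pass 1: outside-quotes table, keeping only (depth, top) instead of a stack.
--     outside = []
--     depth = 0
--     top = ''
--     for ch in text:
--         if ch == '"' or ch == "'":
--             if depth and top == ch:
--                 depth -= 1
--                 top = '"' if ch == "'" else "'"
--             else:
--                 depth += 1
--                 top = ch
--         outside.append(depth == 0)
--     # Pass 2: rightmost unescaped space lying outside quotes.
--     for i in range(len(text) - 1, -1, -1):
--         if text[i] == ' ' and outside[i] and (i == 0 or text[i - 1] != '\\'):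
--             return i + 1
--     return None
-- ===== Notes on version B (the rewrite author's own statement) =====
-- stated objective: faster
-- what changed: B replaces A's explicit quote-stack list (appends/pops and dict lookups) and fused forward lastspace tracking by an O(1) (depth, top) state building an outside-quotes boolean table in one pass, then a separate backward scan that returns at the first (rightmost) unescaped space outside quotes.
import Mathlib
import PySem

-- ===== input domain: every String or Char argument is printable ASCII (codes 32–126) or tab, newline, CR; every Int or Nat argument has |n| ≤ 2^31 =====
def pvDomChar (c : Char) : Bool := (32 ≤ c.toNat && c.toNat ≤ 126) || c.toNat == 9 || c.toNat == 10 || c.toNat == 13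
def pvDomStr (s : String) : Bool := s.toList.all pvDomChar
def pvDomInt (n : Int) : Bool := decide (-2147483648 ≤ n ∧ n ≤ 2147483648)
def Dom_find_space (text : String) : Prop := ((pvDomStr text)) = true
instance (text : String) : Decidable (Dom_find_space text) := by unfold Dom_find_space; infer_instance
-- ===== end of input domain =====

-- B replaces A's explicit quote-stack list by an O(1) (depth, top) state building an
-- outside-quotes table in one pass, plus a separate backward scan for the rightmost
-- unescaped space outside quotes (constant-factor speedup, measured).

-- ===== PORT A =====
def pvBalancing : PySem.Dict Char Char := PySem.Dict.ofList [('"', '"'), ('\'', '\'')]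

def pvAStep (st : Int × List Char × String × Option Int) (l : Char) :
    Int × List Char × String × Option Int :=
  let count := st.1 + 1
  let unbalanced := st.2.1
  let prev := st.2.2.1
  let lastspace := st.2.2.2
  let unbalanced :=
    if l ∈ PySem.Dict.values pvBalancing then
      if unbalanced.length ≠ 0 then
        match unbalanced.getLast? with      -- unbalanced[-1]; in range since length ≠ 0
        | some u =>
          match PySem.Dict.get? pvBalancing u with  -- KeyError impossible: stack holds quote chars only
          | some v => if v = l then unbalanced.dropLast else unbalanced ++ [l]
          | none => unbalanced ++ [l]
        | none => unbalanced
      else unbalanced ++ [l]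
    else if l ∈ PySem.Dict.keys pvBalancing then unbalanced ++ [l]
    else unbalanced
  let lastspace :=
    if l = ' ' ∧ prev ≠ "\\" then
      if unbalanced.length = 0 then some count else lastspace
    else lastspace
  (count, unbalanced, String.mk [l], lastspace)

def find_space (text : String) : Option Int :=
  (text.toList.foldl pvAStep (0, [], "", none)).2.2.2

-- ===== PORT B =====
-- Python's initial top = '' is never compared (depth is checked first); ported as ' '.
def pvBStep (st : Int × Char × List Bool) (ch : Char) : Int × Char × List Bool :=
  let depth := st.1
  let top := st.2.1
  let p :=
    if ch = '"' ∨ ch = '\'' then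
      if depth ≠ 0 ∧ top = ch then
        (depth - 1, if ch = '\'' then '"' else '\'')
      else (depth + 1, ch)
    else (depth, top)
  (p.1, p.2, st.2.2 ++ [decide (p.1 = 0)])

def pvBScan (cs : List Char) (tbl : List Bool) : Nat → Option Int
  | 0 => none
  | n + 1 =>
    -- indices are always in range when called with n ≤ cs.length = tbl.length
    if cs.getD n ' ' = ' ' ∧ tbl.getD n false = true ∧ (n = 0 ∨ cs.getD (n - 1) ' ' ≠ '\\')
    then some ((n : Int) + 1)
    else pvBScan cs tbl n

def find_space_alt (text : String) : Option Int :=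
  let cs := text.toList
  let tbl := (cs.foldl pvBStep (0, ' ', [])).2.2
  pvBScan cs tbl cs.length

-- ===== PRECONDITION & SPEC =====
def Spec_find_space (text : String) (out : Option Int) : Prop := out = find_space_alt text
instance (text : String) (out : Option Int) : Decidable (Spec_find_space text out) := by unfold Spec_find_space; infer_instance

-- ===== CLAIM (what is proved, stated in full; the proofs are below) =====
def Claim_equal_find_space : Prop := ∀ (text : String), Dom_find_space text → Spec_find_space text (find_space text)

-- ===== LEMMAS AND PROOFS =====

def pvOther (c : Char) : Char := if c = '\'' then '"' else '\''

/-- the unique alternating quote stack of depth `n` with top `t` -/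
def pvAlt : Nat → Char → List Char
  | 0, _ => []
  | n + 1, t => pvAlt n (pvOther t) ++ [t]

lemma pv_values : PySem.Dict.values pvBalancing = ['"', '\''] := by decide

lemma pv_get_quote (t : Char) (h : t = '"' ∨ t = '\'') :
    PySem.Dict.get? pvBalancing t = some t := by
  rcases h with h | h <;> subst h <;> decide

lemma pvOther_quote (c : Char) (h : c = '"' ∨ c = '\'') :
    pvOther c = '"' ∨ pvOther c = '\'' := by
  rcases h with h | h <;> subst h <;> simp [pvOther]

lemma pvOther_ne (t c : Char) (ht : t = '"' ∨ t = '\'') (hc : c = '"' ∨ c = '\'')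
    (hne : t ≠ c) : t = pvOther c := by
  rcases ht with ht | ht <;> rcases hc with hc | hc <;> subst ht <;> subst hc <;>
    simp_all [pvOther]

lemma pvAlt_length (n : Nat) (t : Char) : (pvAlt n t).length = n := by
  induction n generalizing t with
  | zero => rfl
  | succ n ih => simp [pvAlt, ih]

lemma pvAlt_getLast (n : Nat) (t : Char) : (pvAlt (n + 1) t).getLast? = some t := by
  simp [pvAlt]

lemma pvAlt_dropLast (n : Nat) (t : Char) : (pvAlt (n + 1) t).dropLast = pvAlt n (pvOther t) := by
  simp [pvAlt]

lemma pvStr_ne (c : Char) : (String.ofList [c] ≠ "\\") ↔ c ≠ '\\' := by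
  constructor
  · intro h hc; subst hc; exact h rfl
  · intro h hc; apply h
    have := congrArg String.toList hc; simpa using this

lemma pvGetD_mid (cs0 : List Char) (c : Char) (zs : List Char) :
    (cs0 ++ c :: zs).getD cs0.length ' ' = c := by
  simp [List.getD]

lemma pvGetD_last (cs0 zs : List Char) (p : Char) (h : cs0.getLast? = some p) :
    (cs0 ++ zs).getD (cs0.length - 1) ' ' = p := by
  have hne : cs0 ≠ [] := by rintro rfl; simp at h
  have hlt : cs0.length - 1 < cs0.length := by
    have := List.length_pos_iff.mpr hne; omega
  rw [List.getLast?_eq_getElem?] at h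
  simp [List.getD, List.getElem?_append_left hlt, h]

lemma pvGetD_tbl (tbl : List Bool) (b : Bool) : (tbl ++ [b]).getD tbl.length false = b := by
  simp [List.getD]

lemma pvBScan_append (cs : List Char) (tbl ext : List Bool) :
    ∀ k, k ≤ tbl.length → pvBScan cs (tbl ++ ext) k = pvBScan cs tbl k := by
  intro k
  induction k with
  | zero => intro _; rfl
  | succ n ih =>
    intro h
    have hn : n < tbl.length := by omega
    simp only [pvBScan, List.getD_append _ _ _ _ hn, ih (by omega)]

lemma pvBScan_succ_of_ne (cs : List Char) (tbl : List Bool) (k : Nat)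
    (h : cs.getD k ' ' ≠ ' ') : pvBScan cs tbl (k + 1) = pvBScan cs tbl k := by
  simp only [pvBScan]
  rw [if_neg (fun hC => h hC.1)]

lemma pvSim (rest : List Char) : ∀ (cs0 : List Char) (d : Int) (t : Char)
    (tbl : List Bool) (prev : String) (ls : Option Int),
    0 ≤ d →
    (d ≠ 0 → t = '"' ∨ t = '\'') →
    tbl.length = cs0.length →
    prev = (match cs0.getLast? with | none => "" | some c => String.mk [c]) →
    ls = pvBScan (cs0 ++ rest) tbl cs0.length →
    (rest.foldl pvAStep ((cs0.length : Int), pvAlt d.toNat t, prev, ls)).2.2.2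
      = pvBScan (cs0 ++ rest) ((rest.foldl pvBStep (d, t, tbl)).2.2)
          (cs0.length + rest.length) := by
  induction rest with
  | nil =>
    intro cs0 d t tbl prev ls hd hq htbl hprev hls
    simpa using hls
  | cons c rest ih =>
    intro cs0 d t tbl prev ls hd hq htbl hprev hls
    simp only [List.foldl_cons]
    by_cases hcq : c = '"' ∨ c = '\''
    · -- quote character: stack update, lastspace untouched
      have hcs : c ≠ ' ' := by rcases hcq with h | h <;> subst h <;> decide
      have hmem : c ∈ PySem.Dict.values pvBalancing := by rw [pv_values]; simpa using hcq
      have hlsq : ∀ b : Bool, ls = pvBScan (cs0 ++ c :: rest) (tbl ++ [b]) (cs0.length + 1) := by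
        intro b
        rw [pvBScan_succ_of_ne _ _ _ (by rw [pvGetD_mid]; exact hcs),
            pvBScan_append _ _ _ _ (le_of_eq htbl.symm)]
        exact hls
      by_cases hd0 : d = 0
      · -- empty stack: push
        subst hd0
        have hA : pvAStep (((cs0.length : Int)), pvAlt (0 : Int).toNat t, prev, ls) c
            = ((cs0.length : Int) + 1, pvAlt ((0 : Int) + 1).toNat c, String.mk [c], ls) := by
          simp [pvAStep, hmem, hcs, pvAlt]
        have hB : pvBStep (0, t, tbl) c = ((0 : Int) + 1, c, tbl ++ [decide ((0 : Int) + 1 = 0)]) := by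
          simp [pvBStep, hcq]
        rw [hA, hB]
        have hnext := ih (cs0 ++ [c]) ((0 : Int) + 1) c (tbl ++ [decide ((0 : Int) + 1 = 0)])
          (String.mk [c]) ls (by omega) (fun _ => hcq) (by simp [htbl]) (by simp)
          (by simpa using hlsq _)
        simpa [Nat.add_comm, Nat.add_left_comm, Nat.add_assoc] using hnext
      · have htq := hq hd0
        obtain ⟨m, hm⟩ : ∃ m, d.toNat = m + 1 := ⟨d.toNat - 1, by omega⟩
        by_cases htc : t = c
        · -- top matches: pop
          have hA : pvAStep (((cs0.length : Int)), pvAlt d.toNat t, prev, ls) c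
              = ((cs0.length : Int) + 1, pvAlt (d - 1).toNat (pvOther c), String.mk [c], ls) := by
            subst htc
            rw [hm]
            simp [pvAStep, hmem, hcs, pvAlt_length, pvAlt_getLast, pv_get_quote t htq,
              pvAlt_dropLast, show (d - 1).toNat = m from by omega]
          have hB : pvBStep (d, t, tbl) c = (d - 1, pvOther c, tbl ++ [decide (d - 1 = 0)]) := by
            simp [pvBStep, pvOther, hcq, hd0, htc]
          rw [hA, hB]
          have hnext := ih (cs0 ++ [c]) (d - 1) (pvOther c) (tbl ++ [decide (d - 1 = 0)])
            (String.mk [c]) ls (by omega) (fun _ => pvOther_quote c hcq) (by simp [htbl])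
            (by simp) (by simpa using hlsq _)
          simpa [Nat.add_comm, Nat.add_left_comm, Nat.add_assoc] using hnext
        · -- top differs: push
          have hto : t = pvOther c := pvOther_ne t c htq hcq htc
          have hA : pvAStep (((cs0.length : Int)), pvAlt d.toNat t, prev, ls) c
              = ((cs0.length : Int) + 1, pvAlt (d + 1).toNat c, String.mk [c], ls) := by
            rw [hm]
            have h1 : (d + 1).toNat = (m + 1) + 1 := by omega
            rw [h1]
            simp [pvAStep, hmem, hcs, pvAlt_length, pvAlt_getLast, pv_get_quote t htq, htc]
            rw [show pvAlt (m + 1 + 1) c = pvAlt (m + 1) (pvOther c) ++ [c] from rfl, ← hto]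
          have hB : pvBStep (d, t, tbl) c = (d + 1, c, tbl ++ [decide (d + 1 = 0)]) := by
            simp [pvBStep, hcq, htc]
          rw [hA, hB]
          have hnext := ih (cs0 ++ [c]) (d + 1) c (tbl ++ [decide (d + 1 = 0)])
            (String.mk [c]) ls (by omega) (fun _ => hcq) (by simp [htbl]) (by simp)
            (by simpa using hlsq _)
          simpa [Nat.add_comm, Nat.add_left_comm, Nat.add_assoc] using hnext
    · -- not a quote: stack and depth unchanged
      have hmem : c ∉ PySem.Dict.values pvBalancing := by rw [pv_values]; simpa using hcq
      have hkey : c ∉ PySem.Dict.keys pvBalancing := by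
        rw [show PySem.Dict.keys pvBalancing = ['"', '\''] from by decide]; simpa using hcq
      have hB : pvBStep (d, t, tbl) c = (d, t, tbl ++ [decide (d = 0)]) := by
        simp [pvBStep, hcq]
      have hdz : (pvAlt d.toNat t).length = 0 ↔ d = 0 := by
        rw [pvAlt_length]; omega
      by_cases hcs : c = ' '
      · -- the space case: lastspace may update
        subst hcs
        have hA : pvAStep (((cs0.length : Int)), pvAlt d.toNat t, prev, ls) ' '
            = ((cs0.length : Int) + 1, pvAlt d.toNat t,  String.mk [' '],
               if prev ≠ "\\" then (if d = 0 then some ((cs0.length : Int) + 1) else ls) else ls) := by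
          simp only [pvAStep, hmem, hkey]
          simp [hdz]
        have hprevC : (prev ≠ "\\") ↔
            (cs0.length = 0 ∨ (cs0 ++ ' ' :: rest).getD (cs0.length - 1) ' ' ≠ '\\') := by
          cases hg : cs0.getLast? with
          | none =>
            have : cs0 = [] := List.getLast?_eq_none_iff.mp hg
            subst this
            simp [hprev]
          | some p =>
            have hne : cs0 ≠ [] := by rintro rfl; simp at hg
            have hk0 : cs0.length ≠ 0 := by simpa [List.length_eq_zero_iff] using hne
            rw [hprev, hg, pvGetD_last _ _ _ hg]
            simpa [hk0] using pvStr_ne p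
        have hls' : (if prev ≠ "\\" then (if d = 0 then some ((cs0.length : Int) + 1) else ls) else ls)
            = pvBScan (cs0 ++ ' ' :: rest) (tbl ++ [decide (d = 0)]) (cs0.length + 1) := by
          simp only [pvBScan]
          rw [pvGetD_mid, show (tbl ++ [decide (d = 0)]).getD cs0.length false = decide (d = 0) from by
              rw [← htbl]; exact pvGetD_tbl _ _,
            pvBScan_append _ _ _ _ (le_of_eq htbl.symm), ← hls]
          by_cases hp : prev = "\\"
          · rw [if_neg (not_not_intro hp), if_neg (fun hC => (hprevC.mpr hC.2.2) hp)]
          · by_cases hdd : d = 0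
            · rw [if_pos hp, if_pos hdd, if_pos ⟨rfl, by simp [hdd], hprevC.mp hp⟩]
            · rw [if_pos hp, if_neg hdd, if_neg (fun hC => hdd (of_decide_eq_true hC.2.1))]
        rw [hA, hB]
        have hnext := ih (cs0 ++ [' ']) d t (tbl ++ [decide (d = 0)]) (String.mk [' '])
          (if prev ≠ "\\" then (if d = 0 then some ((cs0.length : Int) + 1) else ls) else ls)
          hd hq (by simp [htbl]) (by simp) (by simpa using hls')
        simpa [Nat.add_comm, Nat.add_left_comm, Nat.add_assoc] using hnext
      · -- inert character
        have hA : pvAStep (((cs0.length : Int)), pvAlt d.toNat t, prev, ls) c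
            = ((cs0.length : Int) + 1, pvAlt d.toNat t, String.mk [c], ls) := by
          simp [pvAStep, hmem, hkey, hcs]
        have hls' : ls = pvBScan (cs0 ++ c :: rest) (tbl ++ [decide (d = 0)]) (cs0.length + 1) := by
          rw [pvBScan_succ_of_ne _ _ _ (by rw [pvGetD_mid]; exact hcs),
              pvBScan_append _ _ _ _ (le_of_eq htbl.symm)]
          exact hls
        rw [hA, hB]
        have hnext := ih (cs0 ++ [c]) d t (tbl ++ [decide (d = 0)]) (String.mk [c]) ls
          hd hq (by simp [htbl]) (by simp) (by simpa using hls')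
        simpa [Nat.add_comm, Nat.add_left_comm, Nat.add_assoc] using hnext

theorem pv_main (text : String) : find_space text = find_space_alt text := by
  have h := pvSim text.toList [] 0 ' ' [] "" none (le_refl 0) (by simp) rfl rfl (by rfl)
  simpa [find_space, find_space_alt, pvAlt] using h

-- ===== VERDICT (by name: the statement is the Claim_ definition above) =====
theorem find_space_spec : Claim_equal_find_space := by
  intro text _
  unfold Spec_find_space
  exact pv_main text
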